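-- pv_equiv track=rewrite | github.com/Aayu5hK/Ai-labsheet | VaccumAgents/simpleReflexAgent.py | get_move_direction
-- ===== SOURCE A (Python) =====
-- def get_move_direction(current, target):
--     """Get movement sequence from current to target"""
--     path = []
--     i, j = current
--     ti, tj = target
--
--     while i != ti or j != tj:
--         if i < ti:
--             path.append('down')
--             i += 1
--         elif i > ti:
--             path.append('up')
--             i -= 1
--         elif j < tj:
--             path.append('right')
--             j += 1
--         elif j > tj:
--             path.append('left')
--             j -= 1
--     return path
-- ===== SOURCE B (Python) =====
-- def get_move_direction(current, target):
--     """Get movement sequence from current to target"""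
--     i, j = current
--     ti, tj = target
--     di = ti - i
--     dj = tj - j
--     vert = ['down'] * di if di > 0 else ['up'] * (-di)
--     horiz = ['right'] * dj if dj > 0 else ['left'] * (-dj)
--     return vert + horiz
-- ===== Notes on version B (the rewrite author's own statement) =====
-- stated objective: faster
-- what changed: Replaces the unit-step while loop (one append per move) with a closed form: two signed differences computed once and the answer built by list replication, vertical block then horizontal block.
import Mathlib
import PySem

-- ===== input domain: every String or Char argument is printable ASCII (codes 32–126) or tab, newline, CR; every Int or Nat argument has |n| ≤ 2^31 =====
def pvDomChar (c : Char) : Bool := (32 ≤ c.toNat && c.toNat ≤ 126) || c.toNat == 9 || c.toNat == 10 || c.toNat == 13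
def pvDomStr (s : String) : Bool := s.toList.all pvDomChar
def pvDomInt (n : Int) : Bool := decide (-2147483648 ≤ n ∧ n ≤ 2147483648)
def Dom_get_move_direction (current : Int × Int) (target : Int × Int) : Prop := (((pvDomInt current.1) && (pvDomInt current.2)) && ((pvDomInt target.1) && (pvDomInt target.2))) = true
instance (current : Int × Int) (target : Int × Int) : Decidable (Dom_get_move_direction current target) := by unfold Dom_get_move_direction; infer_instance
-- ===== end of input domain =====

-- B replaces A's unit-step while loop by a closed form: two replicated blocks (vertical then horizontal) concatenated; return value only, no side effects.

-- ===== PORT A =====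
-- A's while loop: recursion on the same state (i, j), one step per iteration, branches in A's order.
def get_move_direction_loop (i j ti tj : Int) : List String :=
  if _h : i ≠ ti ∨ j ≠ tj then
    if i < ti then "down" :: get_move_direction_loop (i + 1) j ti tj
    else if i > ti then "up" :: get_move_direction_loop (i - 1) j ti tj
    else if j < tj then "right" :: get_move_direction_loop i (j + 1) ti tj
    else if j > tj then "left" :: get_move_direction_loop i (j - 1) ti tj
    else []
  else []
termination_by ((ti - i).natAbs + (tj - j).natAbs)
decreasing_by all_goals omega

def get_move_direction (current : Int × Int) (target : Int × Int) : List String :=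
  get_move_direction_loop current.1 current.2 target.1 target.2

-- ===== PORT B =====
def get_move_direction_alt (current : Int × Int) (target : Int × Int) : List String :=
  let di := target.1 - current.1
  let dj := target.2 - current.2
  let vert := if di > 0 then List.replicate di.toNat "down" else List.replicate (-di).toNat "up"
  let horiz := if dj > 0 then List.replicate dj.toNat "right" else List.replicate (-dj).toNat "left"
  vert ++ horiz

-- ===== PRECONDITION & SPEC =====
def Spec_get_move_direction (current : Int × Int) (target : Int × Int) (out : List String) : Prop := out = get_move_direction_alt current target
instance (current : Int × Int) (target : Int × Int) (out : List String) : Decidable (Spec_get_move_direction current target out) := by unfold Spec_get_move_direction; infer_instance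

-- ===== CLAIM (what is proved, stated in full; the proofs are below) =====
def Claim_equal_get_move_direction : Prop := ∀ (current : Int × Int) (target : Int × Int), Dom_get_move_direction current target → Spec_get_move_direction current target (get_move_direction current target)

-- ===== LEMMAS AND PROOFS =====
theorem loop_eq_closed (i j ti tj : Int) :
    get_move_direction_loop i j ti tj =
      (if ti - i > 0 then List.replicate (ti - i).toNat "down" else List.replicate (-(ti - i)).toNat "up") ++
      (if tj - j > 0 then List.replicate (tj - j).toNat "right" else List.replicate (-(tj - j)).toNat "left") := by
  induction i, j using get_move_direction_loop.induct ti tj with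
  | case1 i j h hlt ih =>
    rw [get_move_direction_loop, dif_pos h, if_pos hlt, ih]
    have h1 : ti - i > 0 := by omega
    have h2 : (ti - i).toNat = (ti - (i + 1)).toNat + 1 := by omega
    have h3 : ti - (i + 1) > 0 ∨ ti - (i + 1) = 0 := by omega
    rw [if_pos h1, h2, List.replicate_succ]
    rcases h3 with h3 | h3
    · rw [if_pos h3]; simp
    · rw [h3]; simp
  | case2 i j h hlt hgt ih =>
    rw [get_move_direction_loop, dif_pos h, if_neg hlt, if_pos hgt, ih]
    have h1 : ¬ ti - i > 0 := by omega
    have h1' : ¬ ti - (i - 1) > 0 := by omega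
    have h2 : (-(ti - i)).toNat = (-(ti - (i - 1))).toNat + 1 := by omega
    rw [if_neg h1, if_neg h1', h2, List.replicate_succ]
    simp
  | case3 i j h hlt hgt hjlt ih =>
    have hi : i = ti := by omega
    rw [get_move_direction_loop, dif_pos h, if_neg hlt, if_neg hgt, if_pos hjlt, ih]
    have h1 : tj - j > 0 := by omega
    have h2 : (tj - j).toNat = (tj - (j + 1)).toNat + 1 := by omega
    have h3 : tj - (j + 1) > 0 ∨ tj - (j + 1) = 0 := by omega
    subst hi
    simp only [sub_self, lt_irrefl, gt_iff_lt]
    rw [if_pos h1, h2, List.replicate_succ]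
    rcases h3 with h3 | h3
    · rw [if_pos h3]; simp
    · rw [h3]; simp
  | case4 i j h hlt hgt hjlt hjgt ih =>
    have hi : i = ti := by omega
    rw [get_move_direction_loop, dif_pos h, if_neg hlt, if_neg hgt, if_neg hjlt, if_pos hjgt, ih]
    have h1 : ¬ tj - j > 0 := by omega
    have h1' : ¬ tj - (j - 1) > 0 := by omega
    have h2 : (-(tj - j)).toNat = (-(tj - (j - 1))).toNat + 1 := by omega
    subst hi
    simp only [sub_self, lt_irrefl, gt_iff_lt]
    rw [if_neg h1, if_neg h1', h2, List.replicate_succ]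
    simp
  | case5 i j h hlt hgt hjlt hjgt =>
    exfalso; omega
  | case6 i j h =>
    have hi : i = ti ∧ j = tj := by tauto
    obtain ⟨h1, h2⟩ := hi
    subst h1; subst h2
    rw [get_move_direction_loop]
    simp

-- ===== VERDICT (by name: the statement is the Claim_ definition above) =====
theorem get_move_direction_spec : Claim_equal_get_move_direction := by
  intro c t _
  unfold Spec_get_move_direction get_move_direction get_move_direction_alt
  exact loop_eq_closed c.1 c.2 t.1 t.2
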